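-- pv_equiv track=rewrite | github.com/seulmi0827/seulmi | sesac_python/week2_sm/01 코드처리하기.py | solution
-- ===== SOURCE A (Python) =====
-- def solution(code):
--     ret = ''
--     mode = 0
--     idx = 0
--     while idx < len(code):
--         for i in code:
--             if mode == 0:
--                 if code[idx] == '1':
--                     mode = 1
--                     idx += 1
--                 elif idx % 2==0:
--                     ret += i
--                     idx += 1
--                 else:
--                     idx +=1
--             elif mode == 1:
--                 if code[idx] == '1':
--                     mode = 0
--                     idx += 1
--                 elif idx % 2==1:
--                     ret += i
--                     idx +=1
--                 else:
--                     idx +=1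
--     return ret if len(ret)>0 else "EMPTY"
-- ===== SOURCE B (Python) =====
-- def solution(code):
--     # Pass 1: prefix-parity table: parity[i] = (# of '1' chars strictly before index i) % 2.
--     parity = []
--     ones = 0
--     for ch in code:
--         parity.append(ones % 2)
--         if ch == '1':
--             ones += 1
--     # Pass 2: select chars whose index parity matches the precomputed parity (never '1' itself).
--     picked = [ch for i, (ch, p) in enumerate(zip(code, parity)) if ch != '1' and i % 2 == p]
--     return ''.join(picked) if picked else 'EMPTY'
-- ===== Notes on version B (the rewrite author's own statement) =====
-- stated objective: simpler
-- what changed: Replaces A's fused while/for loop with a running mode toggle and manual index bookkeeping by a two-pass decomposition: one pass builds a prefix parity table of toggle-character counts, then an independent selection pass keeps each non-'1' char whose index parity equals the precomputed parity.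
import Mathlib
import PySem

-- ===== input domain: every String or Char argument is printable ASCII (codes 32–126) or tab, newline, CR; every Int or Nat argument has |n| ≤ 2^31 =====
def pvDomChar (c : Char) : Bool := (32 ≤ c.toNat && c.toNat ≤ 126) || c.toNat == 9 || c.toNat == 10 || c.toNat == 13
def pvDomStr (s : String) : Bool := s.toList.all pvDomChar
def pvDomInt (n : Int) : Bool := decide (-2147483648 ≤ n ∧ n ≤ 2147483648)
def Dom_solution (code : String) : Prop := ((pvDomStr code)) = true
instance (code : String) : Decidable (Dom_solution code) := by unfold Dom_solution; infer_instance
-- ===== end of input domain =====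

-- B replaces A's fused while/for running-mode toggle by a two-pass decomposition
-- (prefix-'1'-parity table, then an independent selection pass); objective: simpler.


-- ===== PORT A =====
-- the inner `for i in code` loop; state = (ret, mode, idx); ret kept as List Char
-- (joined into a String at the end) so the proofs can compute.
def solStepA (codeL : List Char) (s : List Char × Int × Int) (i : Char) :
    List Char × Int × Int :=
  let (ret, mode, idx) := s
  -- code[idx]: on every state Python reaches, idx is in range; '?' is never used
  let cIdx := (PySem.List.pyGet? codeL idx).getD '?'
  if mode == 0 then
    if cIdx == '1' then (ret, 1, idx + 1)
    else if PySem.Int.mod idx 2 == 0 then (ret ++ [i], mode, idx + 1)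
    else (ret, mode, idx + 1)
  else if mode == 1 then
    if cIdx == '1' then (ret, 0, idx + 1)
    else if PySem.Int.mod idx 2 == 1 then (ret ++ [i], mode, idx + 1)
    else (ret, mode, idx + 1)
  else s

def solForA (codeL : List Char) (s : List Char × Int × Int) : List Char × Int × Int :=
  codeL.foldl (solStepA codeL) s

-- the outer `while idx < len(code)` loop; fuel only makes it total (Python's loop
-- body runs at most once, since each inner iteration increments idx)
def solWhileA (codeL : List Char) : Nat → List Char × Int × Int → List Char
  | 0, (ret, _, _) => ret
  | fuel + 1, (ret, mode, idx) =>
    if idx < (codeL.length : Int) then solWhileA codeL fuel (solForA codeL (ret, mode, idx))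
    else ret

def solution (code : String) : String :=
  let cs := code.toList
  let ret := solWhileA cs (cs.length + 1) ([], 0, 0)
  if ret.length > 0 then String.ofList ret else "EMPTY"

-- ===== PORT B =====
-- pass 1: parity[i] = (# of '1' strictly before i) % 2
def solParity : List Char → Int → List Int
  | [], _ => []
  | c :: cs, ones =>
    PySem.Int.mod ones 2 :: solParity cs (ones + if c == '1' then 1 else 0)

-- pass 2: the list comprehension over enumerate(zip(code, parity))
def solPick : Int → List (Char × Int) → List Char
  | _, [] => []
  | i, (c, p) :: rest =>
    if c != '1' && PySem.Int.mod i 2 == p then c :: solPick (i + 1) rest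
    else solPick (i + 1) rest

def solution_alt (code : String) : String :=
  let cs := code.toList
  let picked := solPick 0 (cs.zip (solParity cs 0))
  if picked.length > 0 then String.ofList picked else "EMPTY"

-- ===== PRECONDITION & SPEC =====
def Spec_solution (code : String) (out : String) : Prop := out = solution_alt code
instance (code : String) (out : String) : Decidable (Spec_solution code out) := by unfold Spec_solution; infer_instance

-- ===== CLAIM (what is proved, stated in full; the proofs are below) =====
def Claim_equal_solution : Prop := ∀ (code : String), Dom_solution code → Spec_solution code (solution code)

-- ===== LEMMAS AND PROOFS =====

-- reference selector: walk the suffix with current mode and absolute index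
def solRef : List Char → Int → Int → List Char
  | [], _, _ => []
  | c :: cs, mode, idx =>
    if c == '1' then solRef cs (1 - mode) (idx + 1)
    else if PySem.Int.mod idx 2 == mode then c :: solRef cs mode (idx + 1)
    else solRef cs mode (idx + 1)

lemma solForA_spec (codeL : List Char) :
    ∀ (cs : List Char) (n : Nat) (ret : List Char) (mode : Int),
      (mode = 0 ∨ mode = 1) → codeL.drop n = cs →
      ∃ mode', (mode' = 0 ∨ mode' = 1) ∧
        List.foldl (solStepA codeL) (ret, mode, (n : Int)) cs
        = (ret ++ solRef cs mode (n : Int), mode', ((n + cs.length : Nat) : Int)) := by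
  intro cs
  induction cs with
  | nil =>
    intro n ret mode hm _
    exact ⟨mode, hm, by simp [solRef]⟩
  | cons c rest ih =>
    intro n ret mode hm hdrop
    have hn : n < codeL.length := by
      by_contra h
      simp [List.drop_eq_nil_of_le (Nat.le_of_not_lt h)] at hdrop
    have hget : codeL[n]? = some c := by
      have h : (codeL.drop n)[0]? = codeL[n + 0]? := List.getElem?_drop
      rw [hdrop] at h
      simpa using h.symm
    have hget' : PySem.List.pyGet? codeL (n : Int) = some c := by
      simp [PySem.List.pyGet?_natCast, hget]
    have hdrop' : codeL.drop (n + 1) = rest := by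
      have h : List.drop 1 (List.drop n codeL) = List.drop (n + 1) codeL := List.drop_drop
      rw [← h, hdrop]; simp
    have hcast : ((n : Int) + 1) = ((n + 1 : Nat) : Int) := by push_cast; ring
    rcases hm with hm | hm <;> subst hm
    · by_cases h1 : c = '1'
      · subst h1
        obtain ⟨m', hm', heq⟩ := ih (n + 1) ret 1 (Or.inr rfl) hdrop'
        refine ⟨m', hm', ?_⟩
        simp only [List.foldl_cons]
        rw [show solStepA codeL (ret, (0 : Int), (n : Int)) '1' = (ret, 1, (n : Int) + 1) by
          simp [solStepA, hget']]
        rw [hcast]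
        rw [heq]
        have hlen : codeL.length = n + 1 + rest.length := by
          have := congrArg List.length hdrop; simp at this; omega
        simp [solRef] <;> omega
      · by_cases hpar : n % 2 = 0
        · obtain ⟨m', hm', heq⟩ := ih (n + 1) (ret ++ [c]) 0 (Or.inl rfl) hdrop'
          refine ⟨m', hm', ?_⟩
          simp only [List.foldl_cons]
          rw [show solStepA codeL (ret, (0 : Int), (n : Int)) c = (ret ++ [c], 0, (n : Int) + 1) by
            simp [solStepA, hget', h1] <;> omega]
          rw [hcast]
          rw [heq]
          have hlen : codeL.length = n + 1 + rest.length := by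
            have := congrArg List.length hdrop; simp at this; omega
          simp [solRef, h1] <;> omega
        · obtain ⟨m', hm', heq⟩ := ih (n + 1) ret 0 (Or.inl rfl) hdrop'
          refine ⟨m', hm', ?_⟩
          simp only [List.foldl_cons]
          rw [show solStepA codeL (ret, (0 : Int), (n : Int)) c = (ret, 0, (n : Int) + 1) by
            simp [solStepA, hget', h1] <;> omega]
          rw [hcast]
          rw [heq]
          have hlen : codeL.length = n + 1 + rest.length := by
            have := congrArg List.length hdrop; simp at this; omega
          simp [solRef, h1] <;> omega
    · by_cases h1 : c = '1'
      · subst h1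
        obtain ⟨m', hm', heq⟩ := ih (n + 1) ret 0 (Or.inl rfl) hdrop'
        refine ⟨m', hm', ?_⟩
        simp only [List.foldl_cons]
        rw [show solStepA codeL (ret, (1 : Int), (n : Int)) '1' = (ret, 0, (n : Int) + 1) by
          simp [solStepA, hget']]
        rw [hcast]
        rw [heq]
        have hlen : codeL.length = n + 1 + rest.length := by
          have := congrArg List.length hdrop; simp at this; omega
        simp [solRef] <;> omega
      · by_cases hpar : n % 2 = 1
        · obtain ⟨m', hm', heq⟩ := ih (n + 1) (ret ++ [c]) 1 (Or.inr rfl) hdrop'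
          refine ⟨m', hm', ?_⟩
          simp only [List.foldl_cons]
          rw [show solStepA codeL (ret, (1 : Int), (n : Int)) c = (ret ++ [c], 1, (n : Int) + 1) by
            simp [solStepA, hget', h1] <;> omega]
          rw [hcast]
          rw [heq]
          have hlen : codeL.length = n + 1 + rest.length := by
            have := congrArg List.length hdrop; simp at this; omega
          simp [solRef, h1] <;> omega
        · obtain ⟨m', hm', heq⟩ := ih (n + 1) ret 1 (Or.inr rfl) hdrop'
          refine ⟨m', hm', ?_⟩
          simp only [List.foldl_cons]
          rw [show solStepA codeL (ret, (1 : Int), (n : Int)) c = (ret, 1, (n : Int) + 1) by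
            simp [solStepA, hget', h1] <;> omega]
          rw [hcast]
          rw [heq]
          have hlen : codeL.length = n + 1 + rest.length := by
            have := congrArg List.length hdrop; simp at this; omega
          simp [solRef, h1] <;> omega

lemma solWhileA_eq (codeL : List Char) :
    solWhileA codeL (codeL.length + 1) ([], 0, 0) = solRef codeL 0 0 := by
  obtain ⟨m', _, heq⟩ := solForA_spec codeL codeL 0 [] 0 (Or.inl rfl) (by simp)
  rcases hlen : codeL.length with _ | k
  · have : codeL = [] := List.eq_nil_of_length_eq_zero hlen
    subst this
    simp [solWhileA, solRef]
  · show solWhileA codeL (k + 1 + 1) ([], 0, 0) = _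
    rw [solWhileA]
    have hpos : (0 : Int) < (codeL.length : Int) := by rw [hlen]; positivity
    rw [if_pos hpos]
    have heq' : solForA codeL ([], (0 : Int), (0 : Int)) =
        (solRef codeL 0 0, m', (codeL.length : Int)) := by
      unfold solForA
      simpa using heq
    rw [heq']
    show solWhileA codeL (k + 1) (solRef codeL 0 0, m', (codeL.length : Int)) = _
    cases k with
    | zero => rw [solWhileA]; rw [if_neg (by omega)]
    | succ j => rw [solWhileA]; rw [if_neg (by omega)]

lemma solPick_eq_solRef :
    ∀ (cs : List Char) (ones i : Int),
      solPick i (cs.zip (solParity cs ones)) = solRef cs (PySem.Int.mod ones 2) i := by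
  intro cs
  induction cs with
  | nil => intro ones i; simp [solParity, solPick, solRef]
  | cons c rest ih =>
    intro ones i
    simp only [solParity, List.zip_cons_cons, solPick, solRef]
    by_cases h1 : c = '1'
    · subst h1
      simp [ih]
      have hflip : (ones + 1) % 2 = 1 - ones % 2 := by omega
      rw [hflip]
    · by_cases hp : PySem.Int.mod i 2 = PySem.Int.mod ones 2
      · simp [h1, ih]
      · simp [h1, ih]

-- ===== VERDICT (by name: the statement is the Claim_ definition above) =====
theorem solution_spec : Claim_equal_solution := by
  intro code _
  unfold Spec_solution solution solution_alt
  dsimp only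
  rw [solWhileA_eq, solPick_eq_solRef]
  norm_num [show PySem.Int.mod 0 2 = 0 from by decide]
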